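-- pv_equiv track=rewrite | github.com/emithongle/SegmentAddressDemo | address_segmentation/utils.py | findMaxString
-- ===== SOURCE A (Python) =====
-- import string
--
-- def findMaxStringP(text, type, skip=0, skip_chars=''):
--     i, nskip = 0, 0
--     while (i < len(text) and nskip <= skip):
--         if (type == 'ascii'):
--             if (text[i] not in skip_chars):
--                 if (text[i] in string.digits + string.punctuation):
--                     nskip += 1
--                 elif (text[i] in string.ascii_letters):
--                     nskip = 0
--         elif (type == 'digit'):
--             if (text[i] not in skip_chars):
--                 if (text[i] in string.ascii_letters + string.punctuation):
--                     nskip += 1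
--                 elif (text[i] in string.digits):
--                     nskip = 0
--         elif (type == 'punctuation'):
--             None
--         i += 1
--     if nskip > skip:
--         return text[:i-1].strip()
--     elif (i == len(text)):
--         return text.strip()
--
--     return text[:i].strip()
--
-- def findMaxString(text, skip=0, skip_chars=''):
--     tc, td = '', ''
--     c = 0
--     try:
--         for i in range(len(text)):
--             if text[i] in string.digits:
--                 t = findMaxStringP(text[i:], 'digit', skip, skip_chars)
--                 if (c > 0):
--                     t = text[i-c:i] + t
--                     c = 0
--                 if (len(td) < len(t)):
--                     td = t
--
--             elif text[i] in string.ascii_letters: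
--                 t = findMaxStringP(text[i:], 'ascii', skip, skip_chars)
--                 if (c > 0):
--                     t = text[i-c:i] + t
--                     c = 0
--                 if (len(tc) < len(t)):
--                     tc = t
--
--             elif (text[i] in skip_chars): # text[i] in string.punctuation and
--                 # t = findMaxStringP(text[i:], 'punctuation', skip, split_chars)
--                 c += 1
--             else:
--                 c = 0
--
--     except ValueError:
--         None
--
--     return tc, td
-- ===== SOURCE B (Python) =====
-- import string
--
-- def findMaxString(text, skip=0, skip_chars=''):
--     # Faster re-implementation: precompute, for each start position and each run
--     # type, where the skip-tolerant scan ends (one O(n) backward pass per type),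
--     # so the per-start rescan of A's helper disappears.
--     n = len(text)
--
--     def trigger_table(inc, reset):
--         # class per position: 0 neutral, 1 increments nskip, 2 resets it
--         cls = [0 if ch in skip_chars else (1 if ch in inc else (2 if ch in reset else 0))
--                for ch in text]
--         P = [i for i in range(n) if cls[i] == 1]       # positions of class-1 chars
--         C = [0]                                        # prefix counts of class-1 chars
--         for i in range(n):
--             C.append(C[i] + (1 if cls[i] == 1 else 0))
--         nr = [n] * (n + 1)                             # next reset at/after i
--         for i in range(n - 1, -1, -1):
--             nr[i] = i if cls[i] == 2 else nr[i + 1]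
--         T = [n] * (n + 1)  # scan end (exclusive) starting at i with fresh count
--         for i in range(n - 1, -1, -1):
--             k = C[i] + skip                            # (skip+1)-th class-1 char at/after i
--             q = P[k] if 0 <= k < len(P) else None
--             r = nr[i]
--             if q is not None and q < r:
--                 T[i] = q
--             else:
--                 T[i] = T[r + 1] if r < n else n
--         return T
--
--     Ta = trigger_table(string.digits + string.punctuation, string.ascii_letters)
--     Td = trigger_table(string.ascii_letters + string.punctuation, string.digits)
--     tc, td = '', ''
--     c = 0
--     for i in range(n):
--         ch = text[i]
--         if ch in string.digits:
--             t = text[i:Td[i]].strip()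
--             if c > 0:
--                 t = text[i - c:i] + t
--                 c = 0
--             if len(td) < len(t):
--                 td = t
--         elif ch in string.ascii_letters:
--             t = text[i:Ta[i]].strip()
--             if c > 0:
--                 t = text[i - c:i] + t
--                 c = 0
--             if len(tc) < len(t):
--                 tc = t
--         elif ch in skip_chars:
--             c += 1
--         else:
--             c = 0
--     return tc, td
-- ===== Notes on version B (the rewrite author's own statement) =====
-- stated objective: faster
-- what changed: Instead of rescanning the suffix from every digit/letter start (A's findMaxStringP while-loop per position), B classifies each character once and precomputes, in one backward pass per run type using prefix counts of skip-incrementing characters and a next-reset table, the exact end position of the skip-tolerant scan from every start, then does a single forward pass looking the end up in O(1).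
-- outside the precondition, e.g. on findMaxString('ab12', -1, ''): A returns ('ab1', '1'), B returns ('ab12', ''); on findMaxString('a', -1, ''): A returns ('', ''), B returns ('a', '')
import Mathlib
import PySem

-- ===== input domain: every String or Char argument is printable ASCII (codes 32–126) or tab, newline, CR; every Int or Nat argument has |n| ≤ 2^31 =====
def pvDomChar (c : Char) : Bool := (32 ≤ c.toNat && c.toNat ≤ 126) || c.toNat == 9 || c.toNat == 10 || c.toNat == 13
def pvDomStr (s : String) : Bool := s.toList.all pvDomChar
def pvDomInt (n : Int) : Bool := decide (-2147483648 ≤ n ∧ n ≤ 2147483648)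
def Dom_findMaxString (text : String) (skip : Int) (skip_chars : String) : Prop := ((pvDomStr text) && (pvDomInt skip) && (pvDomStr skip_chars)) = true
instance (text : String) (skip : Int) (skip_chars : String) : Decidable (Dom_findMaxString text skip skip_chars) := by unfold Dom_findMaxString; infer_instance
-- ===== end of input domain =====

-- B replaces A's per-start suffix rescans by per-type precomputed scan-end tables (one
-- backward pass each), the objective is speed on the same return values for skip ≥ 0.

def pyDigits : List Char := "0123456789".toList
def pyLetters : List Char := "abcdefghijklmnopqrstuvwxyzABCDEFGHIJKLMNOPQRSTUVWXYZ".toList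
def pyPunct : List Char := "!\"#$%&'()*+,-./:;<=>?@[\\]^_`{|}~".toList

-- ===== PORT A =====
-- the nskip update of one iteration of findMaxStringP's while-loop
def pUpdate (type : String) (sk : List Char) (c : Char) (nskip : Int) : Int :=
  if type = "ascii" then
    (if ¬ sk.contains c then
      (if (pyDigits ++ pyPunct).contains c then nskip + 1
       else if pyLetters.contains c then (0 : Int) else nskip)
     else nskip)
  else if type = "digit" then
    (if ¬ sk.contains c then
      (if (pyLetters ++ pyPunct).contains c then nskip + 1
       else if pyDigits.contains c then (0 : Int) else nskip)
     else nskip)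
  else nskip

-- the while-loop of findMaxStringP: returns final (i, nskip)
def pLoop (text : List Char) (type : String) (skip : Int) (sk : List Char)
    (i : Nat) (nskip : Int) : Nat × Int :=
  if h : i < text.length ∧ nskip ≤ skip then
    pLoop text type skip sk (i + 1) (pUpdate type sk (text.getD i ' ') nskip)
  else (i, nskip)
termination_by text.length - i
decreasing_by omega

def findMaxStringP (text : List Char) (type : String) (skip : Int) (sk : List Char) : List Char :=
  let r := pLoop text type skip sk 0 0
  if r.2 > skip then PySem.Chars.strip (PySem.List.slice text none (some ((r.1 : Int) - 1)))
  else if r.1 = text.length then PySem.Chars.strip text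
  else PySem.Chars.strip (PySem.List.slice text none (some (r.1 : Int)))

-- body of A's for-loop over range(len(text))
def aBody (cs sk : List Char) (skip : Int)
    (st : (List Char × List Char) × Int) (i : Nat) : (List Char × List Char) × Int :=
  let tc := st.1.1
  let td := st.1.2
  let c := st.2
  let ch := cs.getD i ' '
  if pyDigits.contains ch then
    let t := findMaxStringP (PySem.List.slice cs (some (i : Int)) none) "digit" skip sk
    let p := if c > 0 then (PySem.List.slice cs (some ((i : Int) - c)) (some (i : Int)) ++ t, (0 : Int)) else (t, c)
    if td.length < p.1.length then ((tc, p.1), p.2) else ((tc, td), p.2)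
  else if pyLetters.contains ch then
    let t := findMaxStringP (PySem.List.slice cs (some (i : Int)) none) "ascii" skip sk
    let p := if c > 0 then (PySem.List.slice cs (some ((i : Int) - c)) (some (i : Int)) ++ t, (0 : Int)) else (t, c)
    if tc.length < p.1.length then ((p.1, td), p.2) else ((tc, td), p.2)
  else if sk.contains ch then ((tc, td), c + 1)
  else ((tc, td), 0)

def findMaxString (text : String) (skip : Int) (skip_chars : String) : String × String :=
  let cs := text.toList
  let sk := skip_chars.toList
  let st := (List.range cs.length).foldl (aBody cs sk skip) (([], []), 0)
  (String.ofList st.1.1, String.ofList st.1.2)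

-- ===== PORT B =====
-- character class: 0 = neutral, 1 = increments nskip, 2 = resets it
def pyClass (sk inc rst : List Char) (ch : Char) : Nat :=
  if sk.contains ch then 0 else if inc.contains ch then 1 else if rst.contains ch then 2 else 0

-- Source B's trigger_table: T[i] = exclusive end of the skip-tolerant scan starting at i
def triggerTable (cs : List Char) (skip : Int) (sk inc rst : List Char) : List Nat :=
  let n := cs.length
  let cls := cs.map (pyClass sk inc rst)
  let P := (List.range n).filter (fun i => cls.getD i 0 == 1)
  let C : List Nat := (List.range n).foldl (fun C i => C ++ [C.getD i 0 + (if cls.getD i 0 == 1 then 1 else 0)]) [0]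
  let nr := (List.range n).foldr (fun i acc => (if cls.getD i 0 == 2 then i else acc.getD 0 n) :: acc) [n]
  (List.range n).foldr (fun i acc =>
    let k : Int := (C.getD i 0 : Int) + skip
    let q : Option Nat := if 0 ≤ k ∧ k < (P.length : Int) then some (P.getD k.toNat 0) else none
    let r := nr.getD i n
    let t := match q with
      | some q' => if q' < r then q' else (if r < n then acc.getD (r - i) n else n)
      | none => if r < n then acc.getD (r - i) n else n
    t :: acc) [n]

-- body of Source B's final for-loop
def bBody (cs sk : List Char) (Ta Td : List Nat)
    (st : (List Char × List Char) × Int) (i : Nat) : (List Char × List Char) × Int :=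
  let n := cs.length
  let tc := st.1.1
  let td := st.1.2
  let c := st.2
  let ch := cs.getD i ' '
  if pyDigits.contains ch then
    let t := PySem.Chars.strip (PySem.List.slice cs (some (i : Int)) (some ((Td.getD i n : Nat) : Int)))
    let p := if c > 0 then (PySem.List.slice cs (some ((i : Int) - c)) (some (i : Int)) ++ t, (0 : Int)) else (t, c)
    if td.length < p.1.length then ((tc, p.1), p.2) else ((tc, td), p.2)
  else if pyLetters.contains ch then
    let t := PySem.Chars.strip (PySem.List.slice cs (some (i : Int)) (some ((Ta.getD i n : Nat) : Int)))
    let p := if c > 0 then (PySem.List.slice cs (some ((i : Int) - c)) (some (i : Int)) ++ t, (0 : Int)) else (t, c)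
    if tc.length < p.1.length then ((p.1, td), p.2) else ((tc, td), p.2)
  else if sk.contains ch then ((tc, td), c + 1)
  else ((tc, td), 0)

def findMaxString_alt (text : String) (skip : Int) (skip_chars : String) : String × String :=
  let cs := text.toList
  let sk := skip_chars.toList
  let Ta := triggerTable cs skip sk (pyDigits ++ pyPunct) pyLetters
  let Td := triggerTable cs skip sk (pyLetters ++ pyPunct) pyDigits
  let st := (List.range cs.length).foldl (bBody cs sk Ta Td) (([], []), 0)
  (String.ofList st.1.1, String.ofList st.1.2)

-- ===== PRECONDITION & SPEC =====
-- Pre_ excludes negative skip only: a negative skip budget is outside the function's natural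
-- domain, and there A's helper returns text[:-1].strip() through Python's negative-slice
-- wraparound (i-1 = -1 at i = 0), an accident of A's implementation that B does not mimic.
def Pre_findMaxString (text : String) (skip : Int) (skip_chars : String) : Prop := 0 ≤ skip
instance (text : String) (skip : Int) (skip_chars : String) : Decidable (Pre_findMaxString text skip skip_chars) := by unfold Pre_findMaxString; infer_instance

def pvWitness_findMaxString : String × Int × String := ("ab 12.3 c-x", 1, "-")

def Spec_findMaxString (text : String) (skip : Int) (skip_chars : String) (out : String × String) : Prop := out = findMaxString_alt text skip skip_chars
instance (text : String) (skip : Int) (skip_chars : String) (out : String × String) : Decidable (Spec_findMaxString text skip skip_chars out) := by unfold Spec_findMaxString; infer_instance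

-- ===== CLAIM (what is proved, stated in full; the proofs are below) =====
def Claim_equal_findMaxString : Prop := ∀ (text : String) (skip : Int) (skip_chars : String), Dom_findMaxString text skip skip_chars → Pre_findMaxString text skip skip_chars → Spec_findMaxString text skip skip_chars (findMaxString text skip skip_chars)

-- ===== LEMMAS AND PROOFS =====

-- proof-side vocabulary: one step of the nskip automaton, and the scan over a classified list
def clsStep (k : Nat) (ns : Int) : Int := if k = 1 then ns + 1 else if k = 2 then 0 else ns

-- offset of the char whose processing pushes nskip over skip (none = scan runs to the end)
def scanK (skip : Int) : List Nat → Int → Option Nat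
  | [], _ => none
  | k :: l, ns =>
    if clsStep k ns > skip then some 0 else (scanK skip l (clsStep k ns)).map (· + 1)

-- exclusive end of the fresh scan starting at position i of cls
def scEnd (skip : Int) (cls : List Nat) (i : Nat) : Nat :=
  match scanK skip (cls.drop i) 0 with
  | some j => i + j
  | none => cls.length

def cnt (cls : List Nat) (i : Nat) : Nat := (cls.take i).countP (fun a => a == 1)

def ones (cls : List Nat) : List Nat := (List.range cls.length).filter (fun i => cls.getD i 0 == 1)

-- index of the k-th 1 (k ≥ 1), and of the first 2
def nth1 : List Nat → Nat → Option Nat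
  | [], _ => none
  | a :: l, k => if a = 1 then (if k ≤ 1 then some 0 else (nth1 l (k - 1)).map (· + 1))
                 else (nth1 l k).map (· + 1)

def first2 : List Nat → Option Nat
  | [] => none
  | a :: l => if a = 2 then some 0 else (first2 l).map (· + 1)

def nrS (cls : List Nat) (i : Nat) : Nat :=
  match first2 (cls.drop i) with
  | some o => i + o
  | none => cls.length

lemma pUpdate_ascii (sk : List Char) (c : Char) (ns : Int) :
    pUpdate "ascii" sk c ns = clsStep (pyClass sk (pyDigits ++ pyPunct) pyLetters c) ns := by
  unfold pUpdate pyClass clsStep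
  split_ifs <;> simp_all

lemma pUpdate_digit (sk : List Char) (c : Char) (ns : Int) :
    pUpdate "digit" sk c ns = clsStep (pyClass sk (pyLetters ++ pyPunct) pyDigits c) ns := by
  unfold pUpdate pyClass clsStep
  split_ifs <;> simp_all

lemma clsStep_nonneg (k : Nat) (ns : Int) (h : 0 ≤ ns) : 0 ≤ clsStep k ns := by
  unfold clsStep; split_ifs <;> omega

lemma pLoop_scan (text sk : List Char) (type : String) (K : Char → Nat) (skip : Int)
    (hstep : ∀ c ns, pUpdate type sk c ns = clsStep (K c) ns) :
    ∀ fuel i ns, text.length - i ≤ fuel → i ≤ text.length → 0 ≤ ns → ns ≤ skip →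
    (match scanK skip ((text.drop i).map K) ns with
     | some j => ∃ m, pLoop text type skip sk i ns = (i + j + 1, m) ∧ skip < m
     | none => ∃ m, pLoop text type skip sk i ns = (text.length, m) ∧ m ≤ skip) := by
  intro fuel
  induction fuel with
  | zero =>
    intro i ns hfuel hle h0 hskip
    have hi : i = text.length := by omega
    subst hi
    simp only [List.drop_length, List.map_nil, scanK]
    exact ⟨ns, by rw [pLoop]; simp, hskip⟩
  | succ f ih =>
    intro i ns hfuel hle h0 hskip
    by_cases hi : i < text.length
    · have hdrop : text.drop i = text[i] :: text.drop (i + 1) := List.drop_eq_getElem_cons hi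
      have hget : text.getD i ' ' = text[i] := List.getD_eq_getElem _ _ hi
      rw [hdrop]
      simp only [List.map_cons, scanK]
      have hup : pUpdate type sk (text.getD i ' ') ns = clsStep (K text[i]) ns := by
        rw [hget, hstep]
      by_cases htrig : clsStep (K text[i]) ns > skip
      · simp only [if_pos htrig]
        refine ⟨clsStep (K text[i]) ns, ?_, htrig⟩
        rw [pLoop, dif_pos ⟨hi, hskip⟩, hup, pLoop, dif_neg (by omega)]
      · simp only [if_neg htrig]
        have h0' : 0 ≤ clsStep (K text[i]) ns := clsStep_nonneg _ _ h0
        have := ih (i + 1) (clsStep (K text[i]) ns) (by omega) (by omega) h0' (by omega)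
        rw [pLoop, dif_pos ⟨hi, hskip⟩, hup]
        rcases hsc : scanK skip ((text.drop (i + 1)).map K) (clsStep (K text[i]) ns) with _ | j <;>
          rw [hsc] at this <;> simp only [Option.map_none, Option.map_some]
        · exact this
        · obtain ⟨m, hm, hms⟩ := this
          exact ⟨m, by rw [hm]; congr 1; omega, hms⟩
    · have hieq : i = text.length := by omega
      subst hieq
      simp only [List.drop_length, List.map_nil, scanK]
      exact ⟨ns, by rw [pLoop]; simp, hskip⟩

lemma helper_eq (l sk : List Char) (type : String) (K : Char → Nat) (skip : Int)
    (hstep : ∀ c ns, pUpdate type sk c ns = clsStep (K c) ns) (hskip : 0 ≤ skip) :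
    findMaxStringP l type skip sk = PySem.Chars.strip (l.take (scEnd skip (l.map K) 0)) := by
  have h := pLoop_scan l sk type K skip hstep l.length 0 0 (by omega) (by omega) le_rfl hskip
  unfold findMaxStringP scEnd
  simp only [List.drop_zero] at h ⊢
  rcases hsc : scanK skip (l.map K) 0 with _ | j <;> rw [hsc] at h <;> obtain ⟨m, hm, hms⟩ := h
  · rw [hm]
    simp [not_lt.mpr hms, List.take_length, List.length_map]
  · rw [hm]
    simp only [if_pos hms, Nat.zero_add]
    congr 1
    have : ((j + 1 : Nat) : Int) - 1 = ((j : Nat) : Int) := by push_cast; ring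
    rw [this, PySem.List.slice_to_natCast]

lemma ones_cons (a : Nat) (l : List Nat) :
    ones (a :: l) = if a = 1 then 0 :: (ones l).map (· + 1) else (ones l).map (· + 1) := by
  unfold ones
  rw [List.length_cons, List.range_succ_eq_map, List.filter_cons, List.filter_map]
  have hp : ((fun i => (a :: l).getD i 0 == 1) ∘ (· + 1)) = (fun i => l.getD i 0 == 1) := by
    funext i; simp
  rw [hp]
  simp only [List.getD_cons_zero]
  split_ifs with h <;> simp_all

lemma ones_get0 (l : List Nat) (k : Nat) : (ones l)[k]? = nth1 l (k + 1) := by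
  induction l generalizing k with
  | nil => simp [ones, nth1]
  | cons a l ih =>
    rw [ones_cons, nth1]
    by_cases h1 : a = 1
    · rw [if_pos h1, if_pos h1]
      cases k with
      | zero => simp
      | succ k =>
        rw [if_neg (by omega)]
        simp only [List.getElem?_cons_succ, List.getElem?_map, ih]
        norm_num
    · rw [if_neg h1, if_neg h1, List.getElem?_map, ih]

lemma ones_drop_get (l : List Nat) (i k : Nat) (hi : i ≤ l.length) :
    (ones l)[cnt l i + k]? = (nth1 (l.drop i) (k + 1)).map (i + ·) := by
  induction l generalizing i k with
  | nil =>
    have : i = 0 := by simpa using hi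
    subst this
    simp [ones, cnt, nth1]
  | cons a l ih =>
    cases i with
    | zero =>
      rw [cnt, List.take_zero, List.countP_nil, List.drop_zero, ones_get0]
      simp
    | succ i =>
      have hi' : i ≤ l.length := by simpa using hi
      have hcnt : cnt (a :: l) (i + 1) = (if a = 1 then 1 else 0) + cnt l i := by
        simp only [cnt, List.take_succ_cons, List.countP_cons]
        split_ifs <;> simp_all <;> omega
      rw [hcnt, List.drop_succ_cons, ones_cons]
      split_ifs with h1
      · have : 1 + cnt l i + k = (cnt l i + k) + 1 := by omega
        rw [this]
        simp only [List.getElem?_cons_succ, List.getElem?_map, ih i k hi']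
        cases nth1 (l.drop i) (k + 1) <;> simp <;> omega
      · simp only [Nat.zero_add, List.getElem?_map, ih i k hi']
        cases nth1 (l.drop i) (k + 1) <;> simp <;> omega

lemma cnt_succ (cls : List Nat) (i : Nat) (hi : i < cls.length) :
    cnt cls (i + 1) = cnt cls i + (if cls.getD i 0 == 1 then 1 else 0) := by
  unfold cnt
  rw [List.take_add_one, List.countP_append, List.getElem?_eq_getElem hi]
  simp [List.getElem?_eq_getElem hi]


lemma foldl_build {β : Type} (f : List β → Nat → List β) (g : Nat → β) (n : Nat)
    (hstep : ∀ m, m < n → f ((List.range (m + 1)).map g) m = (List.range (m + 1)).map g ++ [g (m + 1)]) :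
    (List.range n).foldl f [g 0] = (List.range (n + 1)).map g := by
  have key : ∀ m, m ≤ n → (List.range m).foldl f [g 0] = (List.range (m + 1)).map g := by
    intro m
    induction m with
    | zero => intro _; simp
    | succ m ih =>
      intro hm
      rw [List.range_succ, List.foldl_append, ih (by omega), List.foldl_cons, List.foldl_nil,
        hstep m (by omega), List.range_succ (n := m + 1), List.map_append]
      simp
  exact key n le_rfl

lemma foldr_build {β : Type} (f : Nat → List β → List β) (g : Nat → β) (n : Nat)
    (hstep : ∀ m, m < n → f m ((List.range' (m + 1) (n - m)).map g) = g m :: (List.range' (m + 1) (n - m)).map g) :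
    (List.range n).foldr f [g n] = (List.range' 0 (n + 1)).map g := by
  have key : ∀ m, m ≤ n → (List.range m).foldr f ((List.range' m (n + 1 - m)).map g) = (List.range' 0 (n + 1)).map g := by
    intro m
    induction m with
    | zero => intro _; simp
    | succ m ih =>
      intro hm
      rw [List.range_succ, List.foldr_append, List.foldr_cons, List.foldr_nil]
      have h1 : n + 1 - (m + 1) = n - m := by omega
      have h2 : f m ((List.range' (m + 1) (n - m)).map g) = (List.range' m (n + 1 - m)).map g := by
        rw [hstep m (by omega)]
        have h3 : n + 1 - m = (n - m) + 1 := by omega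
        rw [h3, List.range'_succ, List.map_cons]
      rw [h1, h2]
      exact ih (by omega)
  have := key n le_rfl
  have h4 : n + 1 - n = 1 := by omega
  rw [h4] at this
  simpa using this

lemma nth1_cons_one_le (l : List Nat) (k : Nat) (hk : k ≤ 1) : nth1 (1 :: l) k = some 0 := by
  rw [nth1]; simp [hk]

lemma nth1_cons_one_gt (l : List Nat) (k : Nat) (hk : 1 < k) :
    nth1 (1 :: l) k = (nth1 l (k - 1)).map (· + 1) := by
  rw [nth1]; simp [Nat.not_le.mpr hk]

lemma nth1_cons_ne (a : Nat) (l : List Nat) (k : Nat) (ha : a ≠ 1) :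
    nth1 (a :: l) k = (nth1 l k).map (· + 1) := by
  rw [nth1]; simp [ha]

lemma first2_cons_two (l : List Nat) : first2 (2 :: l) = some 0 := by
  rw [first2]; simp

lemma first2_cons_ne (a : Nat) (l : List Nat) (ha : a ≠ 2) :
    first2 (a :: l) = (first2 l).map (· + 1) := by
  rw [first2]; simp [ha]

lemma scanK_char (skip : Int) (hskip : 0 ≤ skip) :
    ∀ (l : List Nat) (ns : Int), 0 ≤ ns → ns ≤ skip →
    scanK skip l ns =
      match nth1 l (skip + 1 - ns).toNat, first2 l with
      | some q, some r => if q < r then some q else (scanK skip (l.drop (r + 1)) 0).map (· + (r + 1))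
      | some q, none => some q
      | none, some r => (scanK skip (l.drop (r + 1)) 0).map (· + (r + 1))
      | none, none => none := by
  intro l
  induction l with
  | nil => intro ns _ _; simp [scanK, nth1, first2]
  | cons a l ih =>
    intro ns h0 hle
    rw [scanK]
    by_cases ha1 : a = 1
    · subst ha1
      by_cases htr : ns = skip
      · have hcl : clsStep 1 ns > skip := by simp [clsStep]; omega
        rw [if_pos hcl, nth1_cons_one_le l _ (by omega), first2_cons_ne 1 l (by omega)]
        rcases first2 l with _ | r <;> simp
      · have hlt : ns < skip := lt_of_le_of_ne hle htr
        have hcl : clsStep 1 ns = ns + 1 := by simp [clsStep]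
        rw [hcl, if_neg (by omega), nth1_cons_one_gt l _ (by omega),
          first2_cons_ne 1 l (by omega)]
        have hsub : (skip + 1 - ns).toNat - 1 = (skip + 1 - (ns + 1)).toNat := by omega
        rw [hsub, ih (ns + 1) (by omega) (by omega)]
        rcases nth1 l (skip + 1 - (ns + 1)).toNat with _ | q <;>
          rcases first2 l with _ | r <;>
            simp only [Option.map_none, Option.map_some, List.drop_succ_cons]
        all_goals first
          | rfl
          | (cases scanK skip (l.drop (r + 1)) 0 <;> simp <;> omega)
          | (by_cases hqr : q < r
             · rw [if_pos hqr, if_pos (by omega : q + 1 < r + 1)]; simp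
             · rw [if_neg hqr, if_neg (by omega : ¬ q + 1 < r + 1)]
               cases scanK skip (l.drop (r + 1)) 0 <;> simp <;> omega)
    · by_cases ha2 : a = 2
      · subst ha2
        have hcl : clsStep 2 ns = 0 := by simp [clsStep]
        rw [hcl, if_neg (by omega), nth1_cons_ne 2 l _ (by omega), first2_cons_two]
        rcases nth1 l (skip + 1 - ns).toNat with _ | q <;>
          simp only [Option.map_none, Option.map_some, List.drop_succ_cons, List.drop_zero]
        all_goals first
          | rfl
          | (rw [if_neg (by omega : ¬ q + 1 < 0)]; simp)
      · have hcl : clsStep a ns = ns := by simp [clsStep, ha1, ha2]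
        rw [hcl, if_neg (by omega), nth1_cons_ne a l _ ha1, first2_cons_ne a l ha2,
          ih ns h0 hle]
        rcases nth1 l (skip + 1 - ns).toNat with _ | q <;>
          rcases first2 l with _ | r <;>
            simp only [Option.map_none, Option.map_some, List.drop_succ_cons]
        all_goals first
          | rfl
          | (cases scanK skip (l.drop (r + 1)) 0 <;> simp <;> omega)
          | (by_cases hqr : q < r
             · rw [if_pos hqr, if_pos (by omega : q + 1 < r + 1)]; simp
             · rw [if_neg hqr, if_neg (by omega : ¬ q + 1 < r + 1)]
               cases scanK skip (l.drop (r + 1)) 0 <;> simp <;> omega)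

lemma first2_lt_length (l : List Nat) (o : Nat) (h : first2 l = some o) : o < l.length := by
  induction l generalizing o with
  | nil => simp [first2] at h
  | cons a l ih =>
    rw [first2] at h
    split_ifs at h
    · simp at h
      simp [List.length_cons]
      omega
    · rcases hf : first2 l with _ | o' <;> rw [hf] at h <;> simp at h
      have := ih o' hf
      simp [List.length_cons]
      omega

lemma nth1_lt_length (l : List Nat) (k q : Nat) (h : nth1 l k = some q) : q < l.length := by
  induction l generalizing k q with
  | nil => simp [nth1] at h
  | cons a l ih =>
    rw [nth1] at h
    split_ifs at h
    · simp at h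
      simp [List.length_cons]
      omega
    · rcases hn : nth1 l (k - 1) with _ | q' <;> rw [hn] at h <;> simp at h
      have := ih _ _ hn
      simp [List.length_cons]
      omega
    · rcases hn : nth1 l k with _ | q' <;> rw [hn] at h <;> simp at h
      have := ih _ _ hn
      simp [List.length_cons]
      omega

lemma scEnd_rec (skip : Int) (hskip : 0 ≤ skip) (cls : List Nat) (m : Nat) (hm : m < cls.length) :
    scEnd skip cls m =
      (match (nth1 (cls.drop m) (skip.toNat + 1)).map (m + ·) with
       | some q' => if q' < nrS cls m then q'
                    else (if nrS cls m < cls.length then scEnd skip cls (nrS cls m + 1) else cls.length)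
       | none => if nrS cls m < cls.length then scEnd skip cls (nrS cls m + 1) else cls.length) := by
  have hlen : (cls.drop m).length = cls.length - m := List.length_drop ..
  have hchar := scanK_char skip hskip (cls.drop m) 0 le_rfl hskip
  have htn : (skip + 1 - 0).toNat = skip.toNat + 1 := by omega
  rw [htn] at hchar
  have hdd : ∀ o : Nat, (cls.drop m).drop (o + 1) = cls.drop (m + o + 1) := by
    intro o; rw [List.drop_drop]; congr 1 <;> omega
  rcases hn : nth1 (cls.drop m) (skip.toNat + 1) with _ | q <;>
    rcases hf : first2 (cls.drop m) with _ | o <;>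
      rw [hn, hf] at hchar <;>
        simp only [Option.map_none, Option.map_some] <;>
          unfold scEnd nrS <;> rw [hchar, hf] <;> simp only []
  · rw [if_neg (by omega)]
  · have ho := first2_lt_length _ _ hf
    rw [if_pos (by omega : m + o < cls.length), hdd]
    cases scanK skip (cls.drop (m + o + 1)) 0 <;> simp <;> omega
  · have hq := nth1_lt_length _ _ _ hn
    rw [if_pos (by omega : m + q < cls.length)]
  · have ho := first2_lt_length _ _ hf
    have hq := nth1_lt_length _ _ _ hn
    by_cases hqo : q < o
    · rw [if_pos hqo, if_pos (by omega : m + q < m + o)]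
    · rw [if_neg hqo, if_neg (by omega : ¬ m + q < m + o), if_pos (by omega : m + o < cls.length), hdd]
      cases scanK skip (cls.drop (m + o + 1)) 0 <;> simp <;> omega

lemma nrS_ge (cls : List Nat) (m : Nat) (hm : m ≤ cls.length) : m ≤ nrS cls m := by
  unfold nrS
  cases first2 (cls.drop m) <;> simp <;> omega

lemma nrS_rec (cls : List Nat) (m : Nat) (hm : m < cls.length) :
    nrS cls m = if cls.getD m 0 == 2 then m else nrS cls (m + 1) := by
  have hdrop : cls.drop m = cls[m] :: cls.drop (m + 1) := List.drop_eq_getElem_cons hm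
  have hget : cls.getD m 0 = cls[m] := List.getD_eq_getElem _ _ hm
  unfold nrS
  rw [hdrop, first2, hget]
  by_cases h2 : cls[m] = 2
  · simp [h2]
  · rw [if_neg h2, if_neg (by simpa using h2)]
    cases first2 (cls.drop (m + 1)) <;> simp <;> omega

lemma q_spec (cls : List Nat) (skip : Int) (hskip : 0 ≤ skip) (m : Nat) (hm : m ≤ cls.length) :
    (if 0 ≤ (cnt cls m : Int) + skip ∧ (cnt cls m : Int) + skip < ((ones cls).length : Int)
     then some ((ones cls).getD ((cnt cls m : Int) + skip).toNat 0) else none)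
    = (nth1 (cls.drop m) (skip.toNat + 1)).map (m + ·) := by
  have hkt : (((cnt cls m : Int)) + skip).toNat = cnt cls m + skip.toNat := by omega
  have hget := ones_drop_get cls m skip.toNat hm
  by_cases hlt : cnt cls m + skip.toNat < (ones cls).length
  · rw [if_pos (by constructor <;> omega), hkt]
    rw [List.getElem?_eq_getElem hlt] at hget
    rw [List.getD_eq_getElem _ _ hlt]
    exact hget
  · rw [if_neg (by intro hc; omega)]
    rw [List.getElem?_eq_none (by omega)] at hget
    exact hget

lemma range'_map_getD {β : Type} (g : Nat → β) (s len j : Nat) (d : β) (hj : j < len) :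
    ((List.range' s len).map g).getD j d = g (s + j) := by
  rw [List.getD_eq_getElem _ _ (by simpa using hj)]
  simp

lemma triggerTable_spec (cs : List Char) (skip : Int) (sk inc rst : List Char) (hskip : 0 ≤ skip) :
    triggerTable cs skip sk inc rst
      = (List.range (cs.length + 1)).map (scEnd skip (cs.map (pyClass sk inc rst))) := by
  unfold triggerTable
  dsimp only
  set n := cs.length with hn
  set cls := cs.map (pyClass sk inc rst) with hcls
  have hlen : cls.length = n := by rw [hcls, List.length_map]
  -- the prefix-count table
  have hC : (List.range n).foldl (fun C i => C ++ [C.getD i 0 + (if cls.getD i 0 == 1 then 1 else 0)]) [0]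
      = (List.range (n + 1)).map (cnt cls) := by
    have h0 : [(0 : Nat)] = [cnt cls 0] := by simp [cnt]
    rw [h0]
    apply foldl_build
    intro m hm
    rw [PySem.List.getD_map_range _ _ _ _ (by omega), ← cnt_succ cls m (by omega)]
  -- the next-reset table
  have hnrn : nrS cls n = n := by
    unfold nrS
    rw [← hlen, List.drop_length]
    simp only [first2]
  have hnr : (List.range n).foldr (fun i acc => (if cls.getD i 0 == 2 then i else acc.getD 0 n) :: acc) [n]
      = (List.range (n + 1)).map (nrS cls) := by
    have h0 : [n] = [nrS cls n] := by rw [hnrn]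
    rw [h0, List.range_eq_range' (n := n + 1)]
    apply foldr_build
    intro m hm
    congr 1
    have hsuff : n - m = (n - m - 1) + 1 := by omega
    rw [nrS_rec cls m (by omega)]
    by_cases h2 : (cls.getD m 0 == 2) = true
    · simp only [if_pos h2]
    · simp only [if_neg h2]
      rw [range'_map_getD _ _ _ _ _ (by omega)]
  -- the scan-end table
  have hP : (List.range n).filter (fun i => cls.getD i 0 == 1) = ones cls := by
    unfold ones
    rw [hlen]
  rw [hC, hnr, hP]
  have hTn : scEnd skip cls n = n := by
    unfold scEnd
    rw [← hlen, List.drop_length]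
    simp [scanK]
  have h0 : [n] = [scEnd skip cls n] := by rw [hTn]
  rw [h0, List.range_eq_range' (n := n + 1)]
  apply foldr_build
  intro m hm
  congr 1
  -- identify the three lookups
  rw [range'_map_getD (cnt cls) 0 (n + 1) m 0 (by omega),
    range'_map_getD (nrS cls) 0 (n + 1) m n (by omega)]
  simp only [Nat.zero_add]
  have hq := q_spec cls skip hskip m (by omega)
  rw [hq]
  have hge : m ≤ nrS cls m := nrS_ge cls m (by omega)
  have hrec := scEnd_rec skip hskip cls m (by omega)
  rw [hlen] at hrec
  rcases hn1 : (nth1 (cls.drop m) (skip.toNat + 1)).map (m + ·) with _ | q' <;> rw [hn1] at hrec <;>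
    simp only [] at hrec ⊢
  · rw [hrec]
    by_cases hr : nrS cls m < n
    · rw [if_pos hr, if_pos hr, range'_map_getD _ _ _ _ _ (by omega)]
      congr 1
      omega
    · rw [if_neg hr, if_neg hr]
  · rw [hrec]
    by_cases hqr : q' < nrS cls m
    · rw [if_pos hqr, if_pos hqr]
    · rw [if_neg hqr, if_neg hqr]
      by_cases hr : nrS cls m < n
      · rw [if_pos hr, if_pos hr, range'_map_getD _ _ _ _ _ (by omega)]
        congr 1
        omega
      · rw [if_neg hr, if_neg hr]


lemma scEnd_shift (cs : List Char) (K : Char → Nat) (skip : Int) (i : Nat) :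
    scEnd skip ((cs.drop i).map K) 0 = scEnd skip (cs.map K) i - i := by
  unfold scEnd
  rw [List.drop_zero, List.map_drop]
  cases scanK skip ((cs.map K).drop i) 0 <;> simp

lemma helper_slice_eq (cs sk : List Char) (skip : Int) (hskip : 0 ≤ skip) (i : Nat)
    (hi : i < cs.length) (type : String) (inc rst : List Char)
    (hstep : ∀ c ns, pUpdate type sk c ns = clsStep (pyClass sk inc rst c) ns) :
    findMaxStringP (PySem.List.slice cs (some (i : Int)) none) type skip sk
      = PySem.Chars.strip (PySem.List.slice cs (some (i : Int))
          (some (((triggerTable cs skip sk inc rst).getD i cs.length : Nat) : Int))) := by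
  rw [PySem.List.slice_from_natCast,
    helper_eq (cs.drop i) sk type (pyClass sk inc rst) skip hstep hskip,
    triggerTable_spec cs skip sk inc rst hskip,
    PySem.List.getD_map_range _ _ _ _ (by omega : i < cs.length + 1),
    PySem.List.slice_natCast]
  congr 1
  rw [scEnd_shift]

lemma body_eq (cs sk : List Char) (skip : Int) (hskip : 0 ≤ skip) (st : (List Char × List Char) × Int)
    (i : Nat) (hi : i < cs.length) :
    aBody cs sk skip st i
      = bBody cs sk (triggerTable cs skip sk (pyDigits ++ pyPunct) pyLetters)
          (triggerTable cs skip sk (pyLetters ++ pyPunct) pyDigits) st i := by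
  unfold aBody bBody
  dsimp only
  rw [helper_slice_eq cs sk skip hskip i hi "digit" (pyLetters ++ pyPunct) pyDigits (pUpdate_digit sk),
    helper_slice_eq cs sk skip hskip i hi "ascii" (pyDigits ++ pyPunct) pyLetters (pUpdate_ascii sk)]

-- ===== VERDICT (by name: the statement is the Claim_ definition above) =====
theorem findMaxString_spec : Claim_equal_findMaxString := by
  intro text skip skip_chars _hdom hpre
  unfold Spec_findMaxString findMaxString findMaxString_alt
  dsimp only
  have h := PySem.List.foldl_congr_mem (l := List.range text.toList.length)
    (f := aBody text.toList skip_chars.toList skip)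
    (g := bBody text.toList skip_chars.toList
      (triggerTable text.toList skip skip_chars.toList (pyDigits ++ pyPunct) pyLetters)
      (triggerTable text.toList skip skip_chars.toList (pyLetters ++ pyPunct) pyDigits))
    (init := (([], []), 0))
    (by intro st i hmem; exact body_eq _ _ _ hpre st i (List.mem_range.mp hmem))
  rw [h]
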